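-- pv_equiv track=rewrite | github.com/HeastN/AdventOfCode2023 | day3/main03.py | check_other_line
-- ===== SOURCE A (Python) =====
-- def check_other_line(other_line, numbers):
--     # Return a list of valid numbers, meaning they are surrounded by a character other than '.'
--     valid_numbers = []
--     invalid_numbers = []
--     for number in numbers:
--         # number contains the number as a string and its starting index
--         # Check the line above for characters
--         # If they are not '.' or a digit, then the number is valid
--         # is_valid = False
--         if number[1] == 0:
--             f = 0
--         else:
--             f = 1
--
--         if number[1] == len(other_line)-1:
--             l = 0
--         else:
--             l = 1
--         start = number[1]-f
--         end = start+len(number[0])+1+l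
--         if contains_only_dots_and_digits(other_line[start:end]):
--             invalid_numbers.append(number)
--         else:
--             valid_numbers.append(number)
--
--     return [valid_numbers, invalid_numbers]
--
-- def contains_only_dots_and_digits(s):
--     return all(c.isdigit() or c == '.' for c in s)
-- ===== SOURCE B (Python) =====
-- def check_other_line(other_line, numbers):
--     # Prefix-sum of symbol counts: prefix[k] = number of non-digit, non-dot
--     # characters among other_line[:k].  A window then contains a symbol iff
--     # prefix[b] > prefix[a], so each number is classified with no scanning.
--     n = len(other_line)
--     prefix = [0]
--     for c in other_line:
--         prefix.append(prefix[-1] + (0 if c.isdigit() or c == '.' else 1))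
--     valid_numbers = []
--     invalid_numbers = []
--     for number in numbers:
--         idx = number[1]
--         start = idx - (0 if idx == 0 else 1)
--         end = start + len(number[0]) + 1 + (0 if idx == n - 1 else 1)
--         a = _norm(n, start)
--         b = _norm(n, end)
--         if prefix[b] > prefix[a]:
--             valid_numbers.append(number)
--         else:
--             invalid_numbers.append(number)
--     return [valid_numbers, invalid_numbers]
--
-- def _norm(n, x):
--     # normalize a Python slice bound to an absolute index in [0, n]
--     return max(0, min(x + n, n)) if x < 0 else min(x, n)
-- ===== Notes on version B (the rewrite author's own statement) =====
-- stated objective: alternative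
-- what changed: B replaces A's per-number slice-and-rescan with one prefix-sum pass over other_line counting symbols, so each number is classified in O(1) by comparing two prefix counts of its slice-normalized window, with no per-number scan at all.
import Mathlib
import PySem

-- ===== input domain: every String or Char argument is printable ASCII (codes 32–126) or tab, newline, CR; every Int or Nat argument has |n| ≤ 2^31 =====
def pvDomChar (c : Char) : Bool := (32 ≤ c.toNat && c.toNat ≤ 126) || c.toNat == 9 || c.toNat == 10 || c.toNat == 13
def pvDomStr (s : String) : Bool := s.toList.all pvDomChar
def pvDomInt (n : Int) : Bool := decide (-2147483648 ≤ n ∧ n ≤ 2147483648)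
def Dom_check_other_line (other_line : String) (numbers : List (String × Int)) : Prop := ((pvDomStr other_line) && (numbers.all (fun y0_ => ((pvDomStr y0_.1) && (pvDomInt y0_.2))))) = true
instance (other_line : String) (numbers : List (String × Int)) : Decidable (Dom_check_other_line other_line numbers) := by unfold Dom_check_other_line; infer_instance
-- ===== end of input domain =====

-- B replaces A's per-number slice-and-rescan with one prefix-sum pass counting
-- symbols; each number is then classified by comparing two prefix counts (objective: alternative).

-- ===== PORT A =====
def pvDotsAndDigits (s : List Char) : Bool :=
  s.all (fun c => PySem.Chars.isdigit c || c == '.')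

def check_other_line (other_line : String) (numbers : List (String × Int)) : List (List (String × Int)) :=
  let res := numbers.foldl (fun (acc : List (String × Int) × List (String × Int)) number =>
    let f : Int := if number.2 = 0 then 0 else 1
    let l : Int := if number.2 = PySem.Str.len other_line - 1 then 0 else 1
    let start := number.2 - f
    let stop := start + PySem.Str.len number.1 + 1 + l
    if pvDotsAndDigits (PySem.List.slice other_line.toList (some start) (some stop)) then
      (acc.1, acc.2 ++ [number])
    else
      (acc.1 ++ [number], acc.2)) ([], [])
  [res.1, res.2]

-- ===== PORT B =====
def pvIsSymbol (c : Char) : Bool := !(PySem.Chars.isdigit c || c == '.')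

-- prefix[k] = number of symbol characters among the first k characters
def pvPrefix (cs : List Char) : List Int :=
  cs.foldl (fun (pre : List Int) c =>
    pre ++ [pre.getLastD 0 + (if pvIsSymbol c then 1 else 0)]) [0]

-- normalize a Python slice bound to an absolute index in [0, n]
def pvNorm (n x : Int) : Int := if x < 0 then max 0 (min (x + n) n) else min x n

def check_other_line_alt (other_line : String) (numbers : List (String × Int)) : List (List (String × Int)) :=
  let n : Int := PySem.Str.len other_line
  let pre := pvPrefix other_line.toList
  let res := numbers.foldl (fun (acc : List (String × Int) × List (String × Int)) number =>
    let start := number.2 - (if number.2 = 0 then 0 else 1)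
    let stop := start + PySem.Str.len number.1 + 1 + (if number.2 = n - 1 then 0 else 1)
    let a := pvNorm n start
    let b := pvNorm n stop
    if pre.getD a.toNat 0 < pre.getD b.toNat 0 then
      (acc.1 ++ [number], acc.2)
    else
      (acc.1, acc.2 ++ [number])) ([], [])
  [res.1, res.2]

-- ===== PRECONDITION & SPEC =====
def Spec_check_other_line (other_line : String) (numbers : List (String × Int)) (out : List (List (String × Int))) : Prop := out = check_other_line_alt other_line numbers
instance (other_line : String) (numbers : List (String × Int)) (out : List (List (String × Int))) : Decidable (Spec_check_other_line other_line numbers out) := by unfold Spec_check_other_line; infer_instance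

-- ===== CLAIM (what is proved, stated in full; the proofs are below) =====
def Claim_equal_check_other_line : Prop := ∀ (other_line : String) (numbers : List (String × Int)), Dom_check_other_line other_line numbers → Spec_check_other_line other_line numbers (check_other_line other_line numbers)

-- ===== LEMMAS AND PROOFS =====

theorem pvNorm_eq (n : Nat) (x : Int) :
    pvNorm (n : Int) x = ((PySem.List.clampIdx n x : Nat) : Int) := by
  simp only [pvNorm, PySem.List.clampIdx]
  split_ifs <;> omega

theorem pvPrefix_eq (cs : List Char) :
    pvPrefix cs = (List.range (cs.length + 1)).map
      (fun k => ((cs.take k).countP pvIsSymbol : Int)) := by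
  induction cs using List.reverseRecOn with
  | nil => simp [pvPrefix, List.range_succ]
  | append_singleton cs c ih =>
    unfold pvPrefix at ih ⊢
    rw [List.foldl_append, ih]
    simp only [List.foldl_cons, List.foldl_nil]
    have hlast : ((List.range (cs.length + 1)).map
        (fun k => ((cs.take k).countP pvIsSymbol : Int))).getLastD 0 =
        ((cs.countP pvIsSymbol : Nat) : Int) := by
      rw [List.range_succ, List.map_append]
      simp
    rw [hlast]
    have hmap : (List.range (cs.length + 1)).map
        (fun k => (((cs ++ [c]).take k).countP pvIsSymbol : Int)) =
        (List.range (cs.length + 1)).map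
        (fun k => ((cs.take k).countP pvIsSymbol : Int)) := by
      apply List.map_congr_left
      intro k hk
      rw [List.mem_range] at hk
      rw [List.take_append_of_le_length (by omega)]
    simp only [List.length_append, List.length_cons, List.length_nil]
    conv_rhs => rw [show cs.length + 1 + 1 = (cs.length + 1) + 1 from rfl,
      List.range_succ, List.map_append, hmap]
    congr 1
    have htake : (cs ++ [c]).take (cs.length + 1) = cs ++ [c] := by
      apply List.take_of_length_le; simp
    simp only [List.map_cons, List.map_nil, htake, List.countP_append]
    cases h : pvIsSymbol c <;> simp [h]

theorem pvPrefix_getD (cs : List Char) (k : Nat) (hk : k ≤ cs.length) :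
    (pvPrefix cs).getD k 0 = (((cs.take k).countP pvIsSymbol : Nat) : Int) := by
  rw [pvPrefix_eq]
  rw [List.getD_eq_getElem _ _ (by simpa using Nat.lt_succ_of_le hk)]
  simp

theorem pvDots_iff (s : List Char) :
    pvDotsAndDigits s = true ↔ s.countP pvIsSymbol = 0 := by
  rw [pvDotsAndDigits, List.all_eq_true, List.countP_eq_zero]
  constructor
  · intro h c hc
    have := h c hc
    simp [pvIsSymbol, this]
  · intro h c hc
    have h2 := h c hc
    unfold pvIsSymbol at h2
    cases h3 : (PySem.Chars.isdigit c || c == '.') with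
    | true => rfl
    | false => rw [h3] at h2; simp at h2

theorem pvCount_take_mono (cs : List Char) (j k : Nat) (hjk : j ≤ k) :
    (cs.take j).countP pvIsSymbol ≤ (cs.take k).countP pvIsSymbol := by
  rw [show k = j + (k - j) from by omega, List.take_add, List.countP_append]
  omega

theorem pvKey (cs : List Char) (sa sb : Nat) (hsa : sa ≤ cs.length) (hsb : sb ≤ cs.length) :
    pvDotsAndDigits ((cs.drop sa).take (sb - sa)) =
    ! decide ((pvPrefix cs).getD sa 0 < (pvPrefix cs).getD sb 0) := by
  rw [pvPrefix_getD cs sa hsa, pvPrefix_getD cs sb hsb]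
  rcases Nat.lt_or_ge sb sa with hba | hab
  · have h0 : sb - sa = 0 := by omega
    have hmono := pvCount_take_mono cs sb sa (by omega)
    rw [h0]
    simp only [List.take_zero, pvDotsAndDigits, List.all_nil, Bool.true_eq,
      Bool.not_eq_true', decide_eq_false_iff_not, not_lt]
    omega
  · have hsplit : cs.take sb = cs.take sa ++ (cs.drop sa).take (sb - sa) := by
      conv_lhs => rw [show sb = sa + (sb - sa) from by omega]
      exact List.take_add ..
    have hcount : (cs.take sb).countP pvIsSymbol =
        (cs.take sa).countP pvIsSymbol + ((cs.drop sa).take (sb - sa)).countP pvIsSymbol := by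
      rw [hsplit, List.countP_append]
    cases h : pvDotsAndDigits ((cs.drop sa).take (sb - sa))
    · have : ((cs.drop sa).take (sb - sa)).countP pvIsSymbol ≠ 0 := by
        intro h0
        have := (pvDots_iff _).mpr h0
        rw [h] at this; exact Bool.false_ne_true this
      simp only [Bool.false_eq, Bool.not_eq_false', decide_eq_true_eq]
      omega
    · have h0 := (pvDots_iff _).mp h
      simp only [Bool.true_eq, Bool.not_eq_true', decide_eq_false_iff_not, not_lt]
      omega

theorem pvStep_eq (other_line : String) :
    (fun (acc : List (String × Int) × List (String × Int)) (number : String × Int) =>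
      let f : Int := if number.2 = 0 then 0 else 1
      let l : Int := if number.2 = PySem.Str.len other_line - 1 then 0 else 1
      let start := number.2 - f
      let stop := start + PySem.Str.len number.1 + 1 + l
      if pvDotsAndDigits (PySem.List.slice other_line.toList (some start) (some stop)) then
        (acc.1, acc.2 ++ [number])
      else
        (acc.1 ++ [number], acc.2)) =
    (fun (acc : List (String × Int) × List (String × Int)) (number : String × Int) =>
      let start := number.2 - (if number.2 = 0 then 0 else 1)
      let stop := start + PySem.Str.len number.1 + 1 +
        (if number.2 = PySem.Str.len other_line - 1 then 0 else 1)
      let a := pvNorm (PySem.Str.len other_line) start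
      let b := pvNorm (PySem.Str.len other_line) stop
      if (pvPrefix other_line.toList).getD a.toNat 0 <
          (pvPrefix other_line.toList).getD b.toNat 0 then
        (acc.1 ++ [number], acc.2)
      else
        (acc.1, acc.2 ++ [number])) := by
  funext acc number
  simp only
  set start := number.2 - (if number.2 = 0 then 0 else 1) with hstart
  set stop := start + PySem.Str.len number.1 + 1 +
    (if number.2 = PySem.Str.len other_line - 1 then 0 else 1) with hstop
  have hslice : PySem.List.slice other_line.toList (some start) (some stop) =
      (other_line.toList.drop (PySem.List.clampIdx other_line.toList.length start)).take
        (PySem.List.clampIdx other_line.toList.length stop -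
          PySem.List.clampIdx other_line.toList.length start) := by
    simp [PySem.List.slice]
  have hlen : PySem.Str.len other_line = ((other_line.toList.length : Nat) : Int) :=
    PySem.Str.len_eq other_line
  have hca : pvNorm (PySem.Str.len other_line) start =
      ((PySem.List.clampIdx other_line.toList.length start : Nat) : Int) := by
    rw [hlen]; exact pvNorm_eq _ _
  have hcb : pvNorm (PySem.Str.len other_line) stop =
      ((PySem.List.clampIdx other_line.toList.length stop : Nat) : Int) := by
    rw [hlen]; exact pvNorm_eq _ _
  rw [hslice, hca, hcb]
  simp only [Int.toNat_natCast]
  rw [pvKey other_line.toList _ _ (PySem.List.clampIdx_le _ _) (PySem.List.clampIdx_le _ _)]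
  by_cases hlt : (pvPrefix other_line.toList).getD
      (PySem.List.clampIdx other_line.toList.length start) 0 <
      (pvPrefix other_line.toList).getD
      (PySem.List.clampIdx other_line.toList.length stop) 0
  · rw [decide_eq_true hlt, Bool.not_true, if_neg (by simp), if_pos hlt]
  · rw [decide_eq_false hlt, Bool.not_false, if_pos rfl, if_neg hlt]

-- ===== VERDICT (by name: the statement is the Claim_ definition above) =====
theorem check_other_line_spec : Claim_equal_check_other_line := by
  intro other_line numbers _
  unfold Spec_check_other_line check_other_line check_other_line_alt
  rw [pvStep_eq other_line]
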